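-- pv_equiv track=rewrite | github.com/miliar/Code_Jam_Webscraper | solutions_python/solutions_year16_round0_nr4/1903.py | relRanks
-- ===== SOURCE A (Python) =====
-- import operator
--
-- def relRanks(D,A,option = 'full'):
-- 	'''D is a dataset of permutations of 1...n and A is some subset and this function
-- 		marginalizes the dataset to relative rankings of item subset A'''
-- 	D_A = {};
-- 	if option == 'full':
-- 		for sigma in D:
-- 			rr_A = tuple(relrank(sigma,A));
-- 			if rr_A not in D_A:
-- 				D_A[rr_A] = D[sigma];
-- 			else:
-- 				D_A[rr_A] += D[sigma];
-- 	if option == 'partial':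
-- 		for siginv in D:
-- 			rrinv_A = filter(lambda x: x in A,siginv);
-- 			if rrinv_A not in D_A:
-- 				D_A[rrinv_A] = D[siginv];
-- 			else:
-- 				D_A[rrinv_A] += D[siginv];
-- 	return D_A;
--
-- def perminv(sigma):
-- 	result = sigma[:];
-- 	for i in range(len(sigma)):
-- 		result[sigma[i]] = i;
-- 	return result;
--
-- def relrank(sigma,A):
-- 	sigA = [(sigma[a],i) for a,i in zip(list(A),range(len(A)))];
-- 	sigA_sort = sorted(sigA, key = operator.itemgetter(0));
-- 	phiA_inv = [x[1] for x in sigA_sort];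
-- 	return perminv(phiA_inv)
-- ===== SOURCE B (Python) =====
-- def relRanks(D, A, option='full'):
--     '''Marginalize dataset D to relative rankings on subset A, staged:
--     build (key, weight) pairs, dedupe keys in first-occurrence order,
--     then sum the weights per key.'''
--     if option == 'full':
--         pairs = [(_rankkey(sigma, A), D[sigma]) for sigma in D]
--     elif option == 'partial':
--         pairs = [(tuple(x for x in siginv if x in A), D[siginv]) for siginv in D]
--     else:
--         pairs = []
--     keys = list(dict.fromkeys(k for k, _ in pairs))
--     return {k: sum(w for k2, w in pairs if k2 == k) for k in keys}
--
-- def _rankkey(sigma, A):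
--     vals = [sigma[a] for a in A]
--     return tuple(sum(1 for w in vals if w < v) + sum(1 for w in vals[:i] if w == v)
--                  for i, v in enumerate(vals))
-- ===== Notes on version B (the rewrite author's own statement) =====
-- stated objective: alternative
-- what changed: A accumulates a dict in one loop, ranking each permutation by a stable argsort (sorted + itemgetter) followed by an explicit permutation-inversion loop (perminv); B is staged: it ranks each permutation by direct counting (smaller values anywhere, equal values at earlier positions), builds a flat (key, weight) pair list, dedupes the keys in first-occurrence order, and sums the weights per key in a final pass.
import Mathlib
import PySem

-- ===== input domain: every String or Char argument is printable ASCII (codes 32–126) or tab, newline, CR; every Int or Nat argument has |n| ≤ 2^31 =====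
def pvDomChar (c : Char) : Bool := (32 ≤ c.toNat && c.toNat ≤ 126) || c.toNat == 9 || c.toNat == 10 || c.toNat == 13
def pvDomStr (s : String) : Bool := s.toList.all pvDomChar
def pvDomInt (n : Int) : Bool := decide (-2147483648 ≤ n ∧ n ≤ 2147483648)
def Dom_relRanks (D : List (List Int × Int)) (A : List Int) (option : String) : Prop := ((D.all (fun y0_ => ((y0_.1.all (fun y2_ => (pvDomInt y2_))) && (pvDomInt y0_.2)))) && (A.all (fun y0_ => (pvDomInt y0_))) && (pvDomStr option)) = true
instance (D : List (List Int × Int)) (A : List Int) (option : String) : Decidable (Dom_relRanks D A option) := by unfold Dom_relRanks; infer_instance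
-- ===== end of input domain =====

-- B restructures the function as staged passes: (key, weight) pairs first, then ordered key
-- dedup, then a per-key sum — replacing A's dict-accumulating loop with its sort-then-invert
-- ranking (argsort + perminv); objective: alternative (same cost class).

-- ===== PORT A =====
-- perminv: result = sigma[:]; for i in range(len(sigma)): result[sigma[i]] = i
def perminvA (sigma : List Int) : List Int :=
  (PySem.List.pyRange 0 (sigma.length : Int) 1).foldl
    (fun result i => PySem.List.pySetD result (PySem.List.pyGetD sigma i 0) i) sigma

-- relrank: sigA = [(sigma[a], i) for a, i in zip(list(A), range(len(A)))];
-- stable sort by first component; take second components; invert.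
def relrankA (sigma : List Int) (A : List Int) : List Int :=
  let sigA := (A.zip (PySem.List.pyRange 0 (A.length : Int) 1)).map
      (fun p => (PySem.List.pyGetD sigma p.1 0, p.2))
  let sigA_sort := PySem.List.sorted sigA (fun x => x.1) false
  let phiA_inv := sigA_sort.map (fun x => x.2)
  perminvA phiA_inv

def relRanks (D : List (List Int × Int)) (A : List Int) (option : String) : List (List Int × Int) :=
  let d := PySem.Dict.mk D
  let dA0 : PySem.Dict (List Int) Int := PySem.Dict.empty
  let dA1 := if option == "full" then
      D.foldl (fun dA p =>
        let rr := relrankA p.1 A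
        if dA.contains rr = false then dA.insert rr (PySem.Dict.getD d p.1 0)
        else dA.modify rr 0 (· + PySem.Dict.getD d p.1 0)) dA0
    else dA0
  let dA2 := if option == "partial" then
      -- Python's keys here are filter OBJECTS compared by identity: 'rrinv_A not in D_A'
      -- is always true, so every sigma appends a fresh entry (rendered by the filtered
      -- list's contents). Unreachable under Pre_, which forces D = [] for this option.
      D.foldl (fun dA p =>
        PySem.Dict.mk (dA.items ++ [(p.1.filter (fun x => decide (x ∈ A)), PySem.Dict.getD d p.1 0)])) dA1
    else dA1
  dA2.items

-- ===== PORT B =====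
-- rank of position i: #{w in vals | w < vals[i]} + #{w in vals[:i] | w == vals[i]}
def rankKeyB (sigma : List Int) (A : List Int) : List Int :=
  let vals := A.map (fun a => PySem.List.pyGetD sigma a 0)
  (PySem.List.enumerate vals).map (fun p =>
    ((vals.countP (fun w => decide (w < p.2)) : Int)
      + ((PySem.List.slice vals none (some p.1)).countP (fun w => w == p.2) : Int)))

-- keys = list(dict.fromkeys(...)); result = {k: sum of matching weights for k in keys}
def aggregateB (pairs : List (List Int × Int)) : List (List Int × Int) :=
  let keys := PySem.List.dedup (pairs.map (fun q => q.1))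
  keys.map (fun k => (k, ((pairs.filter (fun q => q.1 == k)).map (fun q => q.2)).sum))

def relRanks_alt (D : List (List Int × Int)) (A : List Int) (option : String) : List (List Int × Int) :=
  let d := PySem.Dict.mk D
  let pairs :=
    if option == "full" then
      D.map (fun p => (rankKeyB p.1 A, PySem.Dict.getD d p.1 0))
    else if option == "partial" then
      -- B's natural choice: hashable tuple keys (A uses identity-keyed filter objects here;
      -- unreachable under Pre_, which forces D = [] for this option)
      D.map (fun p => (p.1.filter (fun x => decide (x ∈ A)), PySem.Dict.getD d p.1 0))
    else []
  aggregateB pairs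

-- ===== PRECONDITION & SPEC =====
-- Pre_ excludes (a) option = "partial" with a nonempty dataset, where A returns a dict keyed
-- by filter OBJECTS (identity-hashed iterators, not tuples of ints — no value of the declared
-- type), and (b) option = "full" with an index in A out of range for some key of D, where
-- A raises IndexError.
def Pre_relRanks (D : List (List Int × Int)) (A : List Int) (option : String) : Prop :=
  (option = "partial" → D = []) ∧
  (option = "full" → ∀ p ∈ D, ∀ a ∈ A, PySem.Raise.InRange p.1.length a)
instance (D : List (List Int × Int)) (A : List Int) (option : String) : Decidable (Pre_relRanks D A option) := by unfold Pre_relRanks; infer_instance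

def pvWitness_relRanks : (List (List Int × Int)) × List Int × String :=
  ([([1, 0, 2], 5), ([2, 0, 1], 3), ([0, 2, 1], 1)], [0, 2], "full")

def Spec_relRanks (D : List (List Int × Int)) (A : List Int) (option : String) (out : List (List Int × Int)) : Prop := out = relRanks_alt D A option
instance (D : List (List Int × Int)) (A : List Int) (option : String) (out : List (List Int × Int)) : Decidable (Spec_relRanks D A option out) := by unfold Spec_relRanks; infer_instance

-- ===== CLAIM (what is proved, stated in full; the proofs are below) =====
def Claim_equal_relRanks : Prop := ∀ (D : List (List Int × Int)) (A : List Int) (option : String), Dom_relRanks D A option → Pre_relRanks D A option → Spec_relRanks D A option (relRanks D A option)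

-- ===== LEMMAS AND PROOFS =====

-- strict lexicographic order on (value, original position) pairs
abbrev pvLex (a b : Int × Int) : Prop := a.1 < b.1 ∨ (a.1 = b.1 ∧ a.2 < b.2)

theorem pv_insertBy_pairwise (x : Int × Int) (acc : List (Int × Int))
    (hp : acc.Pairwise pvLex) (hsnd : ∀ a ∈ acc, a.2 < x.2) :
    (PySem.List.insertBy (fun a b => decide (a.1 < b.1)) x acc).Pairwise pvLex := by
  induction acc with
  | nil => simp [PySem.List.insertBy]
  | cons y ys ih =>
    rw [List.pairwise_cons] at hp
    have hyx : y.2 < x.2 := hsnd y (by simp)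
    simp only [PySem.List.insertBy]
    by_cases hxy : x.1 < y.1
    · simp only [hxy, decide_true, if_true]
      rw [List.pairwise_cons]
      refine ⟨?_, by rw [List.pairwise_cons]; exact hp⟩
      intro a ha
      rcases List.mem_cons.mp ha with h | h
      · subst h; exact Or.inl hxy
      · rcases hp.1 a h with h' | h'
        · exact Or.inl (lt_trans hxy h')
        · exact Or.inl (lt_of_lt_of_le hxy (le_of_eq h'.1))
    · simp only [hxy, decide_false, Bool.false_eq_true, if_false]
      rw [List.pairwise_cons]
      constructor
      · intro a ha
        rcases (PySem.List.mem_insertBy _ _ _ _).mp ha with h | h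
        · subst h
          rcases lt_or_eq_of_le (le_of_not_gt hxy) with h' | h'
          · exact Or.inl h'
          · exact Or.inr ⟨h', hyx⟩
        · exact hp.1 a h
      · exact ih hp.2 (fun a ha => hsnd a (List.mem_cons_of_mem _ ha))

theorem pv_foldl_insertBy_pairwise :
    ∀ (xs acc : List (Int × Int)), acc.Pairwise pvLex →
      (∀ a ∈ acc, ∀ b ∈ xs, a.2 < b.2) → xs.Pairwise (fun a b => a.2 < b.2) →
      (xs.foldl (fun acc x => PySem.List.insertBy (fun a b => decide (a.1 < b.1)) x acc) acc).Pairwise pvLex := by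
  intro xs
  induction xs with
  | nil => intro acc h _ _; simpa using h
  | cons x xs ih =>
    intro acc hacc hcond hxs
    rw [List.pairwise_cons] at hxs
    rw [List.foldl_cons]
    refine ih _ (pv_insertBy_pairwise x acc hacc (fun a ha => hcond a ha x (by simp))) ?_ hxs.2
    intro a ha b hb
    rcases (PySem.List.mem_insertBy _ _ _ _).mp ha with h | h
    · subst h; exact hxs.1 b hb
    · exact hcond a h b (List.mem_cons_of_mem _ hb)

theorem pv_sorted_pairwise (xs : List (Int × Int))
    (h : xs.Pairwise (fun a b => a.2 < b.2)) :
    (PySem.List.sorted xs (fun p => p.1) false).Pairwise pvLex := by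
  rw [PySem.List.sorted_eq_foldl_insertBy]
  exact pv_foldl_insertBy_pairwise xs [] (by simp) (by simp) h

-- Bool form of pvLex (kept a plain def so that `simp` does not refold it)
def pvLexB (a b : Int × Int) : Bool :=
  decide (a.1 < b.1) || (decide (a.1 = b.1) && decide (a.2 < b.2))

theorem pv_countP_pos (s : List (Int × Int)) (hp : s.Pairwise pvLex)
    (m : Nat) (hm : m < s.length) :
    s.countP (fun x => pvLexB x s[m]) = m := by
  induction s generalizing m with
  | nil => simp at hm
  | cons a t ih =>
    rw [List.pairwise_cons] at hp
    cases m with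
    | zero =>
      simp only [List.getElem_cons_zero, List.countP_cons]
      have h1 : pvLexB a a = false := by simp [pvLexB]
      have h2 : t.countP (fun x => pvLexB x a) = 0 := by
        rw [List.countP_eq_zero]
        intro x hx
        have hx' := hp.1 x hx
        simp only [pvLexB, Bool.or_eq_true, Bool.and_eq_true, decide_eq_true_eq, not_or, not_and]
        rcases hx' with h | h
        · constructor
          · omega
          · intro he; omega
        · constructor
          · omega
          · intro he; omega
      rw [h2, h1]
      simp
    | succ m =>
      have hm' : m < t.length := by simpa using hm
      simp only [List.getElem_cons_succ, List.countP_cons]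
      have h1 : pvLexB a t[m] = true := by
        have := hp.1 _ (List.getElem_mem hm')
        simp only [pvLexB, Bool.or_eq_true, Bool.and_eq_true, decide_eq_true_eq]
        rcases this with h | h
        · exact Or.inl h
        · exact Or.inr ⟨h.1, h.2⟩
      rw [ih hp.2 m hm', h1]
      simp

theorem pv_perminv_fold (φ : List Int) (k : Nat)
    (hval : ∀ j, j < k → 0 ≤ φ.getD j 0 ∧ φ.getD j 0 < (k : Int))
    (hinj : ∀ i j, i < k → j < k → φ.getD i 0 = φ.getD j 0 → i = j) :
    ∀ (L : List Nat) (r : List Int), r.length = k → (∀ j ∈ L, j < k) →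
      (L.foldl (fun r j => PySem.List.pySetD r (φ.getD j 0) (j : Int)) r).length = k ∧
      ∀ m, m < k →
        (L.foldl (fun r j => PySem.List.pySetD r (φ.getD j 0) (j : Int)) r).getD (φ.getD m 0).toNat 0
          = if m ∈ L then (m : Int) else r.getD (φ.getD m 0).toNat 0 := by
  intro L
  induction L with
  | nil => intro r hr _; simp [hr]
  | cons j L' ih =>
    intro r hr hL
    have hj : j < k := hL j (List.mem_cons_self ..)
    have hφj := hval j hj
    have hset : PySem.List.pySetD r (φ.getD j 0) (j : Int)
        = r.set (φ.getD j 0).toNat (j : Int) := by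
      have hlt : φ.getD j 0 < (r.length : Int) := by rw [hr]; exact hφj.2
      have h0 : (0 : Int) ≤ φ.getD j 0 := hφj.1
      rw [List.getD_eq_getElem?_getD] at hlt h0
      simp [PySem.List.pySetD, PySem.List.pySet?, PySem.List.pyIdx?, h0, hlt,
        List.getD_eq_getElem?_getD]
    have hr' : (PySem.List.pySetD r (φ.getD j 0) (j : Int)).length = k := by
      rw [hset, List.length_set, hr]
    obtain ⟨hlen, hget⟩ := ih (PySem.List.pySetD r (φ.getD j 0) (j : Int)) hr'
      (fun i hi => hL i (List.mem_cons_of_mem _ hi))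
    constructor
    · rw [List.foldl_cons]; exact hlen
    · intro m hm
      rw [List.foldl_cons, hget m hm]
      by_cases hmem : m ∈ L'
      · simp [hmem]
      · simp only [hmem, if_false]
        by_cases hmj : m = j
        · subst hmj
          have : (r.set (φ.getD m 0).toNat (m : Int)).getD (φ.getD m 0).toNat 0 = (m : Int) := by
            rw [List.getD_eq_getElem?_getD, List.getElem?_set_self (by rw [hr]; omega)]
            rfl
          rw [hset, this]
          simp
        · have hne : (φ.getD j 0).toNat ≠ (φ.getD m 0).toNat := by
            intro he
            apply hmj
            refine (hinj m j hm hj ?_).symm ▸ rfl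
            have h1 := (hval m hm).1
            have h2 := hφj.1
            omega
          have : (r.set (φ.getD j 0).toNat (j : Int)).getD (φ.getD m 0).toNat 0
              = r.getD (φ.getD m 0).toNat 0 := by
            rw [List.getD_eq_getElem?_getD, List.getElem?_set_ne hne, ← List.getD_eq_getElem?_getD]
          rw [hset, this]
          have : ¬ m ∈ j :: L' := by simp [hmj, hmem]
          simp [this]

-- the core identity over the value list alone: invert-the-argsort = position count
theorem pv_core (vals : List Int) :
    perminvA ((PySem.List.sorted ((List.range vals.length).map (fun j => (vals.getD j 0, (j : Int)))) (fun x => x.1) false).map (fun x => x.2))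
      = (List.range vals.length).map (fun i =>
          (((List.range vals.length).countP (fun j => pvLexB (vals.getD j 0, (j : Int)) (vals.getD i 0, (i : Int)))) : Int)) := by
  set k := vals.length
  set P : Nat → Int × Int := fun j => (vals.getD j 0, (j : Int)) with hP
  set s := PySem.List.sorted ((List.range k).map P) (fun x => x.1) false with hs
  have hperm : s.Perm ((List.range k).map P) := PySem.List.sorted_perm _ _ _
  have hpair : s.Pairwise pvLex := by
    apply pv_sorted_pairwise
    rw [List.pairwise_map]
    refine List.pairwise_lt_range.imp (fun {a b} h => ?_)
    show ((a : Int)) < b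
    exact_mod_cast h
  have hslen : s.length = k := by rw [hperm.length_eq]; simp
  set phi := s.map (fun x => x.2) with hphi
  have hphilen : phi.length = k := by simp [hphi, hslen]
  have hphiperm : phi.Perm ((List.range k).map (fun j : Nat => (j : Int))) := by
    have h := hperm.map (fun x : Int × Int => x.2)
    rw [List.map_map] at h
    have hcomp : ((fun x : Int × Int => x.2) ∘ P) = (fun j : Nat => (j : Int)) := rfl
    rw [hcomp] at h
    exact h
  have hphind : phi.Nodup := by
    refine hphiperm.nodup_iff.mpr ?_
    exact List.Nodup.map (fun a b h => by exact_mod_cast h) List.nodup_range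
  have hval : ∀ j, j < k → 0 ≤ phi.getD j 0 ∧ phi.getD j 0 < (k : Int) := by
    intro j hj
    have hjlen : j < phi.length := by omega
    have hmem : phi.getD j 0 ∈ phi := by
      rw [List.getD_eq_getElem _ _ hjlen]; exact List.getElem_mem _
    rcases List.mem_map.mp (hphiperm.mem_iff.mp hmem) with ⟨t, ht, hteq⟩
    rw [List.mem_range] at ht
    rw [← hteq]
    constructor
    · exact Int.natCast_nonneg t
    · exact_mod_cast ht
  have hinj : ∀ i j, i < k → j < k → phi.getD i 0 = phi.getD j 0 → i = j := by
    intro i j hi hj he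
    have hi' : i < phi.length := by omega
    have hj' : j < phi.length := by omega
    rw [List.getD_eq_getElem _ _ hi', List.getD_eq_getElem _ _ hj'] at he
    exact (List.Nodup.getElem_inj_iff hphind).mp he
  obtain ⟨hlen, hget⟩ := pv_perminv_fold phi k hval hinj (List.range k) phi hphilen
    (fun j hj => List.mem_range.mp hj)
  have hLHS : perminvA phi
      = (List.range k).foldl (fun r j => PySem.List.pySetD r (phi.getD j 0) (j : Int)) phi := by
    unfold perminvA
    rw [hphilen, PySem.List.pyRange_zero_natCast, List.foldl_map]
    congr 1
    funext r j
    rw [PySem.List.pyGetD_natCast]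
  rw [hLHS]
  apply List.ext_getElem
  · rw [hlen]; simp
  · intro p h1 h2
    have hp : p < k := by simpa using h2
    have hmem : ((p : Int)) ∈ phi := by
      rw [hphiperm.mem_iff]
      exact List.mem_map.mpr ⟨p, List.mem_range.mpr hp, rfl⟩
    obtain ⟨m, hm, hphim⟩ := List.mem_iff_getElem.mp hmem
    have hmk : m < k := by omega
    have hgd : phi.getD m 0 = (p : Int) := by
      rw [List.getD_eq_getElem _ _ hm]; exact hphim
    have h3 := hget m hmk
    rw [hgd, Int.toNat_natCast] at h3
    rw [if_pos (List.mem_range.mpr hmk)] at h3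
    have hmls : m < s.length := by omega
    have hsm2 : (s[m]).2 = (p : Int) := by
      have hx : phi[m] = (s[m]'hmls).2 := by
        simp [hphi]
      rw [← hx]; exact hphim
    rcases List.mem_map.mp (hperm.mem_iff.mp (List.getElem_mem hmls)) with ⟨t, ht, hteq⟩
    have htp : t = p := by
      have hx : (P t).2 = (p : Int) := by rw [hteq]; exact hsm2
      simpa [hP] using hx
    have hsmP : s[m]'hmls = P p := by rw [← hteq, htp]
    have hcnt := pv_countP_pos s hpair m hmls
    rw [hsmP] at hcnt
    have hcnt2 : ((List.range k).map P).countP (fun x => pvLexB x (P p)) = m := by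
      rw [← hperm.countP_eq]; exact hcnt
    rw [List.countP_map] at hcnt2
    simp only [List.getElem_map, List.getElem_range]
    rw [← List.getD_eq_getElem _ 0 h1, h3]
    have hcnt3 : List.countP (fun j => pvLexB (vals.getD j 0, (j : Int)) (vals.getD p 0, (p : Int))) (List.range k) = m := by
      simpa [Function.comp, hP] using hcnt2
    exact_mod_cast hcnt3.symm

-- ---------- bridge from the combined lex count to B's two split counts ----------

theorem pv_countP_or_disjoint {α : Type} (l : List α) (p q : α → Bool)
    (h : ∀ x ∈ l, ¬(p x = true ∧ q x = true)) :
    l.countP (fun x => p x || q x) = l.countP p + l.countP q := by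
  induction l with
  | nil => simp
  | cons a t ih =>
    have ht : ∀ x ∈ t, ¬(p x = true ∧ q x = true) := fun x hx => h x (List.mem_cons_of_mem _ hx)
    have ha := h a (List.mem_cons_self ..)
    simp only [List.countP_cons, ih ht]
    by_cases hp : p a = true
    · have hq : q a = false := by cases hqa : q a with
        | true => exact absurd ⟨hp, hqa⟩ ha
        | false => rfl
      simp [hp, hq]
      omega
    · have hp' : p a = false := by simpa using hp
      cases hq : q a with
      | true => simp [hp']; omega
      | false => simp [hp']

theorem pv_map_getD_range_take (xs : List Int) (i : Nat) (h : i ≤ xs.length) :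
    (List.range i).map (fun j => xs.getD j 0) = xs.take i := by
  apply List.ext_getElem
  · simp [h]
  · intro n h1 h2
    have hn : n < i := by simpa using h1
    simp only [List.getElem_map, List.getElem_range, List.getElem_take]
    rw [List.getD_eq_getElem _ _ (by omega)]

theorem pv_count_split (vals : List Int) (i : Nat) (hi : i < vals.length) :
    (List.range vals.length).countP (fun j => pvLexB (vals.getD j 0, (j : Int)) (vals.getD i 0, (i : Int)))
      = vals.countP (fun w => decide (w < vals.getD i 0))
        + (vals.take i).countP (fun w => w == vals.getD i 0) := by
  set v := vals.getD i 0 with hv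
  have hform : (List.range vals.length).countP
        (fun j => pvLexB (vals.getD j 0, (j : Int)) (v, (i : Int)))
      = (List.range vals.length).countP
        (fun j => decide (vals.getD j 0 < v) || (decide (vals.getD j 0 = v) && decide (j < i))) := by
    refine List.countP_congr (fun j _ => ?_)
    simp [pvLexB]
  rw [hform, pv_countP_or_disjoint]
  · congr 1
    · -- count of strictly smaller over all positions = count over the values
      have := pv_map_getD_range_take vals vals.length (le_refl _)
      rw [List.take_length] at this
      conv_rhs => rw [← this]
      rw [List.countP_map]
      rfl
    · -- count of equal at earlier positions = count over the prefix
      have hsplit : vals.length = i + (vals.length - i) := by omega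
      rw [hsplit, List.range_add, List.countP_append]
      have h2 : (List.countP (fun j => decide (vals.getD j 0 = v) && decide (j < i))
          ((List.range (vals.length - i)).map (i + ·))) = 0 := by
        rw [List.countP_eq_zero]
        intro x hx
        rcases List.mem_map.mp hx with ⟨m, _, hm⟩
        subst hm
        simp
      rw [h2, Nat.add_zero]
      have h3 : (List.range i).countP (fun j => decide (vals.getD j 0 = v) && decide (j < i))
          = (List.range i).countP (fun j => decide (vals.getD j 0 = v)) := by
        refine List.countP_congr (fun j hj => ?_)
        have : j < i := List.mem_range.mp hj
        simp [this]
      rw [h3, ← pv_map_getD_range_take vals i (by omega), List.countP_map]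
      refine List.countP_congr (fun j _ => ?_)
      simp
  · intro j _ hcontra
    rcases hcontra with ⟨h1, h2⟩
    simp only [decide_eq_true_eq, Bool.and_eq_true] at h1 h2
    omega

theorem pv_enumerate_eq (xs : List Int) :
    ∀ s : Int, PySem.List.enumerate xs s
      = (List.range xs.length).map (fun i : Nat => (s + (i : Int), xs.getD i 0)) := by
  induction xs with
  | nil => intro s; simp [PySem.List.enumerate_nil]
  | cons x t ih =>
    intro s
    rw [PySem.List.enumerate_cons, ih (s + 1)]
    simp only [List.length_cons, List.range_succ_eq_map, List.map_cons, List.map_map]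
    refine List.cons_eq_cons.mpr ⟨by simp, ?_⟩
    refine List.map_congr_left (fun i _ => ?_)
    simp only [Function.comp_apply, List.getD_cons_succ, Prod.mk.injEq]
    exact ⟨by push_cast; ring, trivial⟩

-- A's per-permutation key equals B's per-permutation key
theorem pv_relrank_eq (sigma A : List Int) : relrankA sigma A = rankKeyB sigma A := by
  have hsigA : (A.zip (PySem.List.pyRange 0 (A.length : Int) 1)).map
      (fun p => (PySem.List.pyGetD sigma p.1 0, p.2))
      = (List.range (A.map (fun a => PySem.List.pyGetD sigma a 0)).length).map
          (fun j => ((A.map (fun a => PySem.List.pyGetD sigma a 0)).getD j 0, (j : Int))) := by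
    rw [PySem.List.pyRange_zero_natCast]
    apply List.ext_getElem
    · simp
    · intro i h1 h2
      have hiA : i < A.length := by simpa using h1
      simp only [List.getElem_map, List.getElem_zip, List.getElem_range]
      have hx : (A.map (fun a => PySem.List.pyGetD sigma a 0)).getD i 0
          = PySem.List.pyGetD sigma (A[i]) 0 := by
        rw [List.getD_eq_getElem _ _ (by simpa using hiA)]
        simp
      rw [hx]
  simp only [relrankA, rankKeyB]
  rw [hsigA, pv_core]
  set vals := A.map (fun a => PySem.List.pyGetD sigma a 0) with hvals
  rw [pv_enumerate_eq vals 0, List.map_map]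
  refine List.map_congr_left (fun i hi => ?_)
  have hik : i < vals.length := List.mem_range.mp hi
  simp only [Function.comp_apply, zero_add]
  rw [PySem.List.slice_to_natCast]
  rw [pv_count_split vals i hik]
  push_cast
  ring

-- ---------- the aggregation: dict loop = dedup keys + per-key sums ----------

-- A's loop body is exactly a weighted-counter modify step
theorem pv_step_modify (d : PySem.Dict (List Int) Int) (k : List Int) (w : Int) :
    (if d.contains k = false then d.insert k w else d.modify k 0 (· + w))
      = d.modify k 0 (· + w) := by
  by_cases h : d.contains k = false
  · rw [if_pos h]
    show d.insert k w = d.insert k (d.getD k 0 + w)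
    rw [PySem.Dict.getD_of_not_contains d 0 h, zero_add]
  · rw [if_neg h]

theorem pv_getD_fold_modify (ps : List (List Int × Int)) :
    ∀ (d : PySem.Dict (List Int) Int) (k : List Int),
      (ps.foldl (fun dA q => dA.modify q.1 0 (· + q.2)) d).getD k 0
        = d.getD k 0 + ((ps.filter (fun q => q.1 == k)).map (fun q => q.2)).sum := by
  induction ps with
  | nil => intro d k; simp
  | cons p t ih =>
    intro d k
    rw [List.foldl_cons, ih]
    rw [PySem.Dict.getD_modify]
    by_cases h : k = p.1
    · subst h
      simp only [List.filter_cons, beq_self_eq_true, if_true, List.map_cons, List.sum_cons]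
      ring
    · rw [if_neg h]
      have : (p.1 == k) = false := by simp [Ne.symm h]
      simp only [List.filter_cons, this, Bool.false_eq_true, if_false]

theorem pv_items_eq_keys_map (d : PySem.Dict (List Int) Int) (h : d.keys.Nodup) :
    d.items = d.keys.map (fun k => (k, d.getD k 0)) := by
  apply List.ext_getElem
  · simp [PySem.Dict.keys]
  · intro n h1 h2
    simp only [PySem.Dict.keys, List.getElem_map]
    have hmem : (d.items[n].1, d.items[n].2) ∈ d.items := List.getElem_mem h1
    rw [PySem.Dict.getD_of_mem_items d hmem h 0]

theorem pv_fold_items (ps : List (List Int × Int)) :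
    (ps.foldl (fun dA q => dA.modify q.1 0 (· + q.2))
        (PySem.Dict.empty : PySem.Dict (List Int) Int)).items = aggregateB ps := by
  set dfin := ps.foldl (fun dA q => dA.modify q.1 0 (· + q.2))
      (PySem.Dict.empty : PySem.Dict (List Int) Int) with hdfin
  have hkeys : dfin.keys = PySem.List.dedup (ps.map (fun q => q.1)) := by
    rw [hdfin, PySem.Dict.keys_foldl_modify_key]
    simp [PySem.Dict.keys_empty, PySem.Set.update, PySem.Set.ofList_eq_foldl]
  have hnodup : dfin.keys.Nodup := by
    rw [hdfin]
    exact PySem.Dict.nodup_keys_foldl_modify_key ps (fun q => q.1) 0 (fun _ q => (· + q.2)) _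
      (by simp)
  rw [pv_items_eq_keys_map dfin hnodup, hkeys]
  unfold aggregateB
  refine List.map_congr_left (fun k _ => ?_)
  rw [hdfin, pv_getD_fold_modify]
  simp

-- ===== VERDICT (by name: the statement is the Claim_ definition above) =====
theorem relRanks_spec : Claim_equal_relRanks := by
  intro D A option _ hpre
  unfold Spec_relRanks
  simp only [relRanks, relRanks_alt]
  by_cases h1 : option = "full"
  · have hb1 : (option == "full") = true := by simp [h1]
    have hb2 : (option == "partial") = false := by simp [h1]
    simp only [hb1, hb2, if_true, Bool.false_eq_true, if_false]
    have hstep : D.foldl (fun dA p =>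
          let rr := relrankA p.1 A
          if dA.contains rr = false then dA.insert rr (PySem.Dict.getD (PySem.Dict.mk D) p.1 0)
          else dA.modify rr 0 (· + PySem.Dict.getD (PySem.Dict.mk D) p.1 0)) PySem.Dict.empty
        = (D.map (fun p => (rankKeyB p.1 A, PySem.Dict.getD (PySem.Dict.mk D) p.1 0))).foldl
            (fun dA q => dA.modify q.1 0 (· + q.2)) PySem.Dict.empty := by
      rw [List.foldl_map]
      apply PySem.List.foldl_congr_mem
      intro acc p _
      simp only
      rw [pv_relrank_eq, pv_step_modify]
    rw [hstep, pv_fold_items]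
  · by_cases h2 : option = "partial"
    · have hD : D = [] := hpre.1 h2
      subst hD
      simp [aggregateB, PySem.Dict.empty, PySem.List.dedup]
    · have hb1 : (option == "full") = false := by simp [h1]
      have hb2 : (option == "partial") = false := by simp [h2]
      simp only [hb1, hb2, Bool.false_eq_true, if_false]
      simp [aggregateB, PySem.Dict.empty, PySem.List.dedup]
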